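-- pv_equiv track=rewrite | github.com/davidtao44/Back_project | app/utils/vhdl_utils.py | generate_vhdl_code
-- ===== SOURCE A (Python) =====
-- def generate_vhdl_code(vhdl_matrix, width, height):
--     """Genera código VHDL con la estructura de Memoria_Imagen.vhd."""
--     vhdl_code = [
--         "library ieee; ",
--         "use ieee.std_logic_1164.all; ",
--         "use ieee.numeric_std.all; ",
--         "",
--         "entity Memoria_Imagen is",
--         "",
--         "\tgeneric (",
--         "\t\tdata_width  : natural := 8; ",
--         "\t   addr_length : natural := 10\t-- 1024 pos mem",
--         "\t\t); ",
--         "\t",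
--         "\tport ( ",
--         "\t\tclk      :  in std_logic;",
--         "--\t\trst : in std_logic;",
--         "\t\taddress  :  in std_logic_vector(addr_length-1 downto 0); ",
--         "\t\tdata_out :  out std_logic_vector(data_width-1  downto 0) ",
--         "\t\t);",
--         "\t\t",
--         "end Memoria_Imagen;",
--         "",
--         "",
--         "architecture synth of Memoria_Imagen is",
--         "",
--         "\tconstant mem_size : natural := 2**addr_length; \t",
--         "\ttype mem_type is array (0 to mem_size-1) of std_logic_vector (data_width-1 downto 0); ",
--         "",
--         "constant mem : mem_type := (",
--     ]
--
--     flat_matrix = []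
--     for row in vhdl_matrix:
--         flat_matrix.extend(row)
--
--     for i in range(0, len(flat_matrix), 32):
--         chunk = flat_matrix[i:i + 32]
--         line = "\t\t" + ", ".join(chunk)
--         if i + 32 < len(flat_matrix):
--             line += ","
--         vhdl_code.append(line)
--
--     vhdl_code.extend([
--         "\t);",
--         "",
--         "\t",
--         "begin ",
--         "",
--         "\trom : process (clk) ",
--         "\tbegin",
--         "\t   ",
--         "----\t   if (rising_edge(Clk)) then",
--         "--\t\t  if rst = '1' then",
--         "--\t\t\t\t-- Reset the counter to 0",
--         "--\t\t\t\tdata_out <= ((others=> '0'));",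
--         "--\t\t  end if;",
--         "\t   ",
--         "\t\tif rising_edge(clk) then ",
--         "\t\t\tdata_out <= mem(to_integer(unsigned(address))); ",
--         "\t\tend if; ",
--         "\tend process rom; ",
--         "",
--         "end architecture synth;",
--     ])
--
--     return "\n".join(vhdl_code)
-- ===== SOURCE B (Python) =====
-- _HEADER = (
--     "library ieee; \n"
--     "use ieee.std_logic_1164.all; \n"
--     "use ieee.numeric_std.all; \n"
--     "\n"
--     "entity Memoria_Imagen is\n"
--     "\n"
--     "\tgeneric (\n"
--     "\t\tdata_width  : natural := 8; \n"
--     "\t   addr_length : natural := 10\t-- 1024 pos mem\n"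
--     "\t\t); \n"
--     "\t\n"
--     "\tport ( \n"
--     "\t\tclk      :  in std_logic;\n"
--     "--\t\trst : in std_logic;\n"
--     "\t\taddress  :  in std_logic_vector(addr_length-1 downto 0); \n"
--     "\t\tdata_out :  out std_logic_vector(data_width-1  downto 0) \n"
--     "\t\t);\n"
--     "\t\t\n"
--     "end Memoria_Imagen;\n"
--     "\n"
--     "\n"
--     "architecture synth of Memoria_Imagen is\n"
--     "\n"
--     "\tconstant mem_size : natural := 2**addr_length; \t\n"
--     "\ttype mem_type is array (0 to mem_size-1) of std_logic_vector (data_width-1 downto 0); \n"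
--     "\n"
--     "constant mem : mem_type := ("
-- )
--
-- _FOOTER = (
--     "\t);\n"
--     "\n"
--     "\t\n"
--     "begin \n"
--     "\n"
--     "\trom : process (clk) \n"
--     "\tbegin\n"
--     "\t   \n"
--     "----\t   if (rising_edge(Clk)) then\n"
--     "--\t\t  if rst = '1' then\n"
--     "--\t\t\t\t-- Reset the counter to 0\n"
--     "--\t\t\t\tdata_out <= ((others=> '0'));\n"
--     "--\t\t  end if;\n"
--     "\t   \n"
--     "\t\tif rising_edge(clk) then \n"
--     "\t\t\tdata_out <= mem(to_integer(unsigned(address))); \n"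
--     "\t\tend if; \n"
--     "\tend process rom; \n"
--     "\n"
--     "end architecture synth;"
-- )
--
--
-- def generate_vhdl_code(vhdl_matrix, width, height):
--     """Genera código VHDL con la estructura de Memoria_Imagen.vhd."""
--     pieces = [_HEADER]
--     count = 0
--     for row in vhdl_matrix:
--         for value in row:
--             if count % 32 != 0:
--                 pieces.append(", ")
--             elif count == 0:
--                 pieces.append("\n\t\t")
--             else:
--                 pieces.append(",\n\t\t")
--             pieces.append(value)
--             count += 1
--     pieces.append("\n")
--     pieces.append(_FOOTER)
--     return "".join(pieces)
-- ===== Notes on version B (the rewrite author's own statement) =====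
-- stated objective: alternative
-- what changed: B streams the matrix values in a single nested pass with a global element counter, emitting the correct separator (", " inside a line, ",\n\t\t" at each 32-element boundary) before each value and concatenating once at the end, instead of A's flatten-then-chunk-by-32 construction with per-line slices and a trailing-comma index test; header/footer are single literals rather than joined line lists.
import Mathlib
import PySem

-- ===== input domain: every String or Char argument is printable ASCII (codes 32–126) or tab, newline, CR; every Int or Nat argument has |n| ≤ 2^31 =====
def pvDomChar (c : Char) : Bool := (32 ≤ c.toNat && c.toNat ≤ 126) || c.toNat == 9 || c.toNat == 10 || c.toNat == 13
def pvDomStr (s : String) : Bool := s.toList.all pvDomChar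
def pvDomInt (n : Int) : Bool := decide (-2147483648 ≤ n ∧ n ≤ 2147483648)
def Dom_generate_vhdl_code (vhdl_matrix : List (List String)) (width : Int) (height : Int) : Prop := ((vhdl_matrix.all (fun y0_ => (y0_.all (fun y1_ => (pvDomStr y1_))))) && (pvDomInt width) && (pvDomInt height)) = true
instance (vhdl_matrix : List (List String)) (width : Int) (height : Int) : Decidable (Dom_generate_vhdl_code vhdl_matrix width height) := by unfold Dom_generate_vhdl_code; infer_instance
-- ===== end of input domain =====

-- B builds the memory section in one streaming nested pass with a global element counter that
-- emits the separator before each value (", " inside a line, ",\n\t\t" at 32-element boundaries),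
-- with header/footer as single literals, instead of A's flatten + chunk-by-32 slicing with a
-- per-line trailing-comma index test (alternative decomposition; same cost).


-- ===== PORT A =====
-- A's fixed line lists (literal from Source A)
def vhdlHeader : List String := [
  "library ieee; ",
  "use ieee.std_logic_1164.all; ",
  "use ieee.numeric_std.all; ",
  "",
  "entity Memoria_Imagen is",
  "",
  "\tgeneric (",
  "\t\tdata_width  : natural := 8; ",
  "\t   addr_length : natural := 10\t-- 1024 pos mem",
  "\t\t); ",
  "\t",
  "\tport ( ",
  "\t\tclk      :  in std_logic;",
  "--\t\trst : in std_logic;",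
  "\t\taddress  :  in std_logic_vector(addr_length-1 downto 0); ",
  "\t\tdata_out :  out std_logic_vector(data_width-1  downto 0) ",
  "\t\t);",
  "\t\t",
  "end Memoria_Imagen;",
  "",
  "",
  "architecture synth of Memoria_Imagen is",
  "",
  "\tconstant mem_size : natural := 2**addr_length; \t",
  "\ttype mem_type is array (0 to mem_size-1) of std_logic_vector (data_width-1 downto 0); ",
  "",
  "constant mem : mem_type := ("]

def vhdlFooter : List String := [
  "\t);",
  "",
  "\t",
  "begin ",
  "",
  "\trom : process (clk) ",
  "\tbegin",
  "\t   ",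
  "----\t   if (rising_edge(Clk)) then",
  "--\t\t  if rst = '1' then",
  "--\t\t\t\t-- Reset the counter to 0",
  "--\t\t\t\tdata_out <= ((others=> '0'));",
  "--\t\t  end if;",
  "\t   ",
  "\t\tif rising_edge(clk) then ",
  "\t\t\tdata_out <= mem(to_integer(unsigned(address))); ",
  "\t\tend if; ",
  "\tend process rom; ",
  "",
  "end architecture synth;"]

def generate_vhdl_code (vhdl_matrix : List (List String)) (width : Int) (height : Int) : String :=
  let vhdl_code := vhdlHeader
  let flat_matrix := vhdl_matrix.foldl (fun acc row => acc ++ row) []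
  let vhdl_code := (PySem.List.pyRange 0 (PySem.List.len flat_matrix) 32).foldl
    (fun acc i =>
      let chunk := PySem.List.slice flat_matrix (some i) (some (i + 32))
      let line := "\t\t" ++ PySem.Str.join ", " chunk
      let line := if i + 32 < PySem.List.len flat_matrix then line ++ "," else line
      acc ++ [line]) vhdl_code
  let vhdl_code := vhdl_code ++ vhdlFooter
  PySem.Str.join "\n" vhdl_code

-- ===== PORT B =====
-- B's fixed text as single literals (_HEADER/_FOOTER in Source B)
def pvHeaderStr : String := "library ieee; \nuse ieee.std_logic_1164.all; \nuse ieee.numeric_std.all; \n\nentity Memoria_Imagen is\n\n\tgeneric (\n\t\tdata_width  : natural := 8; \n\t   addr_length : natural := 10\t-- 1024 pos mem\n\t\t); \n\t\n\tport ( \n\t\tclk      :  in std_logic;\n--\t\trst : in std_logic;\n\t\taddress  :  in std_logic_vector(addr_length-1 downto 0); \n\t\tdata_out :  out std_logic_vector(data_width-1  downto 0) \n\t\t);\n\t\t\nend Memoria_Imagen;\n\n\narchitecture synth of Memoria_Imagen is\n\n\tconstant mem_size : natural := 2**addr_length; \t\n\ttype mem_type is array (0 to mem_size-1) of std_logic_vector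 (data_width-1 downto 0); \n\nconstant mem : mem_type := ("

def pvFooterStr : String := "\t);\n\n\t\nbegin \n\n\trom : process (clk) \n\tbegin\n\t   \n----\t   if (rising_edge(Clk)) then\n--\t\t  if rst = '1' then\n--\t\t\t\t-- Reset the counter to 0\n--\t\t\t\tdata_out <= ((others=> '0'));\n--\t\t  end if;\n\t   \n\t\tif rising_edge(clk) then \n\t\t\tdata_out <= mem(to_integer(unsigned(address))); \n\t\tend if; \n\tend process rom; \n\nend architecture synth;"

def generate_vhdl_code_alt (vhdl_matrix : List (List String)) (width : Int) (height : Int) : String :=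
  let pieces : List String := [pvHeaderStr]
  let st := vhdl_matrix.foldl
    (fun (st : List String × Int) row =>
      row.foldl
        (fun (st : List String × Int) value =>
          let pieces := st.1
          let count := st.2
          let pieces :=
            if PySem.Int.mod count 32 ≠ 0 then pieces ++ [", "]
            else if count = 0 then pieces ++ ["\n\t\t"]
            else pieces ++ [",\n\t\t"]
          (pieces ++ [value], count + 1)) st)
    (pieces, 0)
  let pieces := st.1 ++ ["\n"] ++ [pvFooterStr]
  PySem.Str.join "" pieces

-- ===== PRECONDITION & SPEC =====
def Spec_generate_vhdl_code (vhdl_matrix : List (List String)) (width : Int) (height : Int) (out : String) : Prop := out = generate_vhdl_code_alt vhdl_matrix width height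
instance (vhdl_matrix : List (List String)) (width : Int) (height : Int) (out : String) : Decidable (Spec_generate_vhdl_code vhdl_matrix width height out) := by unfold Spec_generate_vhdl_code; infer_instance

-- ===== CLAIM (what is proved, stated in full; the proofs are below) =====
def Claim_equal_generate_vhdl_code : Prop := ∀ (vhdl_matrix : List (List String)) (width : Int) (height : Int), Dom_generate_vhdl_code vhdl_matrix width height → Spec_generate_vhdl_code vhdl_matrix width height (generate_vhdl_code vhdl_matrix width height)

-- ===== LEMMAS AND PROOFS =====

theorem pvJoin_singleton (sep x : String) : PySem.Str.join sep [x] = x := by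
  simp [PySem.Str.join, PySem.Chars.join, List.intercalate]

theorem pvJoin_cons (sep x : String) (ys : List String) (h : ys ≠ []) :
    PySem.Str.join sep (x :: ys) = x ++ sep ++ PySem.Str.join sep ys := by
  cases ys with
  | nil => exact absurd rfl h
  | cons y t =>
    simp [PySem.Str.join, PySem.Chars.join, List.intercalate, String.ofList_append,
      String.append_assoc]

theorem pvJoin_append (sep : String) (xs ys : List String) (hx : xs ≠ []) (hy : ys ≠ []) :
    PySem.Str.join sep (xs ++ ys) = PySem.Str.join sep xs ++ sep ++ PySem.Str.join sep ys := by
  induction xs with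
  | nil => exact absurd rfl hx
  | cons x t ih =>
    cases t with
    | nil => simp [pvJoin_singleton, pvJoin_cons sep x ys hy]
    | cons z w =>
      rw [List.cons_append, pvJoin_cons sep x _ (by simp), pvJoin_cons sep x _ (by simp),
        ih (by simp)]
      simp [String.append_assoc]

theorem pvRange_nil (a b s : Int) (hs : 0 < s) (h : b ≤ a) : PySem.List.pyRange a b s = [] := by
  rw [PySem.List.pyRange_of_pos a b hs]
  simp [if_neg (by omega : ¬ a < b)]

theorem pvRange_cons (a b s : Int) (hs : 0 < s) (h : a < b) :
    PySem.List.pyRange a b s = a :: PySem.List.pyRange (a + s) b s := by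
  rw [PySem.List.pyRange_of_pos a b hs, PySem.List.pyRange_of_pos (a+s) b hs]
  rw [if_pos h]
  have key : (b - a + s - 1) / s = (b - (a+s) + s - 1) / s + 1 := by
    have : b - a + s - 1 = (b - (a+s) + s - 1) + 1 * s := by ring
    rw [this, Int.add_mul_ediv_right _ _ (by omega : s ≠ 0)]
  by_cases h2 : a + s < b
  · rw [if_pos h2]
    have hnn : 0 ≤ (b - (a+s) + s - 1) / s := Int.ediv_nonneg (by omega) (by omega)
    have : ((b - a + s - 1) / s).toNat = ((b - (a+s) + s - 1) / s).toNat + 1 := by omega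
    rw [this, List.range_succ_eq_map]
    simp [List.map_map, Function.comp]
    intro k _; ring
  · rw [if_neg h2]
    have hz : (b - (a+s) + s - 1) / s = 0 := by
      apply Int.ediv_eq_zero_of_lt <;> omega
    have : ((b - a + s - 1) / s).toNat = 1 := by rw [key, hz]; rfl
    rw [this]
    simp

-- the "\n"-join of A's per-line-comma'd lines is the ",\n"-join of the plain lines
theorem pvCommafy (n : Int) (lineB : Int → String) (k : Nat) :
    ∀ a : Int, n ≤ a + 32 * k →
    PySem.Str.join "\n" ((PySem.List.pyRange a n 32).map
        (fun i => if i + 32 < n then lineB i ++ "," else lineB i))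
      = PySem.Str.join ",\n" ((PySem.List.pyRange a n 32).map lineB) := by
  induction k with
  | zero =>
    intro a h
    rw [pvRange_nil a n 32 (by omega) (by omega)]
    simp; rfl
  | succ k ih =>
    intro a h
    by_cases ha : a < n
    · rw [pvRange_cons a n 32 (by omega) ha]
      by_cases h2 : a + 32 < n
      · have htail : PySem.List.pyRange (a + 32) n 32 ≠ [] := by
          rw [pvRange_cons (a + 32) n 32 (by omega) h2]; simp
        rw [List.map_cons, List.map_cons,
          pvJoin_cons _ _ _ (by simpa using htail),
          pvJoin_cons _ _ _ (by simpa using htail),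
          if_pos h2, ih (a + 32) (by omega)]
        simp [String.append_assoc]
      · rw [pvRange_nil (a + 32) n 32 (by omega) (by omega)]
        simp [pvJoin_singleton, if_neg h2]
    · rw [pvRange_nil a n 32 (by omega) (by omega)]
      simp; rfl

-- ===== B-side machinery: the streaming pass characterised =====

-- the separator B emits before the element with 0-based global index c
def pvSep (c : Int) : String :=
  if PySem.Int.mod c 32 ≠ 0 then ", " else if c = 0 then "\n\t\t" else ",\n\t\t"

-- B's loop body as a named function (definitionally the lambda in the port)
def pvStep (st : List String × Int) (value : String) : List String × Int :=
  ((if PySem.Int.mod st.2 32 ≠ 0 then st.1 ++ [", "]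
    else if st.2 = 0 then st.1 ++ ["\n\t\t"]
    else st.1 ++ [",\n\t\t"]) ++ [value], st.2 + 1)

-- the pieces B emits for the elements xs starting at global index c
def pvEmit (c : Int) : List String → List String
  | [] => []
  | v :: rest => pvSep c :: v :: pvEmit (c + 1) rest

def pvChunks (xs : List String) : List (List String) :=
  if h : xs = [] then [] else xs.take 32 :: pvChunks (xs.drop 32)
termination_by xs.length
decreasing_by
  have : xs.length ≠ 0 := fun hl => h (List.eq_nil_of_length_eq_zero hl)
  simp [List.length_drop]; omega

def pvLine (chunk : List String) : String := "\t\t" ++ PySem.Str.join ", " chunk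

theorem pvJoin0_nil : PySem.Str.join "" ([] : List String) = "" := by
  simp [PySem.Str.join, PySem.Chars.join, List.intercalate]

theorem pvJoin0_cons (x : String) (l : List String) :
    PySem.Str.join "" (x :: l) = x ++ PySem.Str.join "" l := by
  cases l with
  | nil => simp [pvJoin_singleton, pvJoin0_nil]
  | cons y t => rw [pvJoin_cons _ _ _ (by simp)]; simp

theorem pvJoin0_append (l1 l2 : List String) :
    PySem.Str.join "" (l1 ++ l2) = PySem.Str.join "" l1 ++ PySem.Str.join "" l2 := by
  induction l1 with
  | nil => simp [pvJoin0_nil]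
  | cons x t ih => simp [pvJoin0_cons, ih, String.append_assoc]

theorem pvStep_eq (p : List String) (c : Int) (v : String) :
    pvStep (p, c) v = (p ++ [pvSep c, v], c + 1) := by
  unfold pvStep pvSep
  split_ifs <;> simp

theorem pvFoldl_emit (xs : List String) : ∀ (p : List String) (c : Int),
    xs.foldl pvStep (p, c) = (p ++ pvEmit c xs, c + xs.length) := by
  induction xs with
  | nil => intro p c; simp [pvEmit]
  | cons v rest ih =>
    intro p c
    rw [List.foldl_cons, pvStep_eq, ih]
    simp [pvEmit]
    omega

theorem pvFoldl_rows (m : List (List String)) : ∀ (p : List String) (c : Int),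
    m.foldl (fun st row => row.foldl pvStep st) (p, c)
      = (p ++ pvEmit c (m.flatMap (fun row => row)), c + (m.flatMap (fun row => row)).length) := by
  induction m with
  | nil => intro p c; simp [pvEmit]
  | cons r t ih =>
    intro p c
    rw [List.foldl_cons, pvFoldl_emit, ih]
    have hemit : ∀ (c : Int) (a b : List String), pvEmit c (a ++ b) = pvEmit c a ++ pvEmit (c + a.length) b := by
      intro c a
      induction a generalizing c with
      | nil => simp [pvEmit]
      | cons x s iha =>
        intro b
        simp [pvEmit, iha (c + 1) b]
        ring_nf
    simp [hemit]
    omega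

theorem pvStrNL : ("\n" : String) ++ "\t\t" = "\n\t\t" := by decide
theorem pvStrCNL : (",\n" : String) ++ "\t\t" = ",\n\t\t" := by decide

theorem pvJoinSep_foldr (sep v : String) (rest : List String) :
    PySem.Str.join sep (v :: rest) = v ++ rest.foldr (fun x s => sep ++ x ++ s) "" := by
  induction rest generalizing v with
  | nil => simp [pvJoin_singleton]
  | cons w r ih =>
    rw [pvJoin_cons _ _ _ (by simp), ih w]
    simp [String.append_assoc]

theorem pvEmitRun (rest : List String) : ∀ (c : Int), 0 ≤ c → 1 ≤ c % 32 →
    c % 32 + rest.length ≤ 32 →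
    PySem.Str.join "" (pvEmit c rest) = rest.foldr (fun x s => ", " ++ x ++ s) "" := by
  induction rest with
  | nil => intro c _ _ _; simp [pvEmit, pvJoin0_nil]
  | cons v r ih =>
    intro c hc h1 h2
    have hmod : PySem.Int.mod c 32 = c % 32 := PySem.Int.mod_eq_emod_of_pos (by omega)
    have hsep : pvSep c = ", " := by unfold pvSep; rw [hmod, if_pos (by omega)]
    simp only [pvEmit, pvJoin0_cons, hsep]
    cases r with
    | nil => simp [pvEmit, pvJoin0_nil]
    | cons w r' =>
      simp only [List.length_cons] at h2
      rw [ih (c + 1) (by omega) (by omega) (by simp only [List.length_cons]; omega)]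
      simp [String.append_assoc]

theorem pvEmitChunk (xs : List String) (c : Int) (hc : 0 ≤ c) (hm : c % 32 = 0)
    (hne : xs ≠ []) (hlen : xs.length ≤ 32) :
    PySem.Str.join "" (pvEmit c xs) = (if c = 0 then "\n" else ",\n") ++ pvLine xs := by
  cases xs with
  | nil => exact absurd rfl hne
  | cons v rest =>
    have hmod : PySem.Int.mod c 32 = c % 32 := PySem.Int.mod_eq_emod_of_pos (by omega)
    have hsep : pvSep c = (if c = 0 then "\n" else ",\n") ++ "\t\t" := by
      unfold pvSep
      rw [hmod, if_neg (by omega)]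
      by_cases h0 : c = 0
      · rw [if_pos h0, if_pos h0, pvStrNL]
      · rw [if_neg h0, if_neg h0, pvStrCNL]
    have hrest : PySem.Str.join "" (pvEmit (c + 1) rest)
        = rest.foldr (fun x s => ", " ++ x ++ s) "" := by
      cases rest with
      | nil => simp [pvEmit, pvJoin0_nil]
      | cons w r' =>
        simp only [List.length_cons] at hlen
        exact pvEmitRun _ (c + 1) (by omega) (by omega) (by simp only [List.length_cons]; omega)
    simp only [pvEmit]
    rw [pvJoin0_cons, pvJoin0_cons, hrest, hsep]
    unfold pvLine
    rw [pvJoinSep_foldr ", " v rest]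
    simp [String.append_assoc]

theorem pvChunks_ne (xs : List String) (h : xs ≠ []) :
    pvChunks xs = xs.take 32 :: pvChunks (xs.drop 32) := by
  rw [pvChunks]; simp [h]

theorem pvEmitAll (k : Nat) : ∀ (xs : List String) (c : Int), 0 ≤ c → c % 32 = 0 →
    xs.length ≤ 32 * k →
    PySem.Str.join "" (pvEmit c xs) =
      if xs = [] then ""
      else (if c = 0 then "\n" else ",\n") ++ PySem.Str.join ",\n" ((pvChunks xs).map pvLine) := by
  induction k with
  | zero =>
    intro xs c _ _ hl
    have : xs = [] := by
      cases xs with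
      | nil => rfl
      | cons a b => simp at hl
    subst this
    simp [pvEmit, pvJoin0_nil]
  | succ k ih =>
    intro xs c hc hm hl
    by_cases hne : xs = []
    · subst hne; simp [pvEmit, pvJoin0_nil]
    · rw [if_neg hne, pvChunks_ne xs hne]
      have hsplit : xs = xs.take 32 ++ xs.drop 32 := (List.take_append_drop 32 xs).symm
      have hemit : ∀ (c : Int) (a b : List String), pvEmit c (a ++ b) = pvEmit c a ++ pvEmit (c + a.length) b := by
        intro c a
        induction a generalizing c with
        | nil => simp [pvEmit]
        | cons x s iha =>
          intro b
          simp [pvEmit, iha (c + 1) b]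
          ring_nf
      have htake_ne : xs.take 32 ≠ [] := by
        cases xs with
        | nil => exact absurd rfl hne
        | cons a b => simp
      have htake_len : (xs.take 32).length ≤ 32 := by simp
      by_cases hd : xs.drop 32 = []
      · -- single chunk: everything fits in one line
        have hxtake : xs.take 32 = xs := by
          have hdl : (xs.drop 32).length = xs.length - 32 := by simp
          rw [hd] at hdl
          simp at hdl
          exact List.take_of_length_le (by omega)
        rw [hd]
        rw [pvChunks]
        simp only [hxtake]
        rw [pvEmitChunk xs c hc hm hne (by rw [← hxtake]; exact htake_len)]
        simp [pvJoin_singleton]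
      · -- at least two chunks
        have hlen32 : 32 < xs.length := by
          by_contra hcon
          exact hd (List.drop_eq_nil_of_le (by omega))
        have htake32 : (xs.take 32).length = 32 := by simp; omega
        conv_lhs => rw [hsplit]
        rw [hemit, pvJoin0_append,
          pvEmitChunk (xs.take 32) c hc hm htake_ne htake_len,
          htake32]
        rw [show (c + ((32 : Nat) : Int)) = c + 32 from by norm_num]
        rw [ih (xs.drop 32) (c + 32) (by omega) (by omega) (by simp; omega)]
        rw [if_neg hd, if_neg (show ¬ (c + 32 : Int) = 0 by omega)]
        have hchne : (pvChunks (xs.drop 32)).map pvLine ≠ [] := by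
          rw [pvChunks_ne _ hd]; simp
        rw [List.map_cons, pvJoin_cons _ _ _ hchne]
        simp [String.append_assoc]

-- A's pyRange-and-slice chunking equals the recursive chunking of the flat list
theorem pvChunk_slices (k : Nat) : ∀ (a : Int) (flat : List String), 0 ≤ a →
    PySem.List.len flat - a ≤ 32 * k →
    (PySem.List.pyRange a (PySem.List.len flat) 32).map
        (fun i => PySem.List.slice flat (some i) (some (i + 32)))
      = pvChunks (flat.drop a.toNat) := by
  induction k with
  | zero =>
    intro a flat ha hk
    have hlen : (flat.length : Int) = PySem.List.len flat := by simp [PySem.List.len]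
    rw [pvRange_nil _ _ _ (by omega) (by omega)]
    have : flat.drop a.toNat = [] := List.drop_eq_nil_of_le (by omega)
    rw [this, pvChunks]
    simp
  | succ k ih =>
    intro a flat ha hk
    have hlen : (flat.length : Int) = PySem.List.len flat := by simp [PySem.List.len]
    by_cases hlt : a < PySem.List.len flat
    · rw [pvRange_cons _ _ _ (by omega) hlt, List.map_cons]
      have hslice : PySem.List.slice flat (some a) (some (a + 32))
          = (flat.drop a.toNat).take 32 := by
        rw [PySem.List.slice_toNat flat ha (by omega : (0:Int) ≤ a + 32)]
        congr 1
        omega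
      have hdne : flat.drop a.toNat ≠ [] := by
        intro hcon
        have := List.drop_eq_nil_iff.mp hcon
        omega
      rw [pvChunks_ne _ hdne, hslice]
      congr 1
      have hdd : (flat.drop a.toNat).drop 32 = flat.drop (a + 32).toNat := by
        rw [List.drop_drop]
        congr 1
        omega
      rw [hdd]
      exact ih (a + 32) flat (by omega) (by omega)
    · rw [pvRange_nil _ _ _ (by omega) (by omega)]
      have : flat.drop a.toNat = [] := List.drop_eq_nil_of_le (by omega)
      rw [this, pvChunks]
      simp

set_option maxRecDepth 40000 in
theorem pvHeaderStr_eq : PySem.Str.join "\n" vhdlHeader = pvHeaderStr := by rfl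
set_option maxRecDepth 40000 in
theorem pvFooterStr_eq : PySem.Str.join "\n" vhdlFooter = pvFooterStr := by rfl

-- ===== VERDICT (by name: the statement is the Claim_ definition above) =====
theorem generate_vhdl_code_spec : Claim_equal_generate_vhdl_code := by
  intro m w h _
  unfold Spec_generate_vhdl_code generate_vhdl_code generate_vhdl_code_alt
  rw [PySem.List.foldl_append_eq_flatMap (fun row => row)]
  simp only [List.nil_append]
  rw [show (fun (st : List String × Int) row => List.foldl
        (fun (st : List String × Int) value =>
          let pieces := st.1
          let count := st.2
          let pieces :=
            if PySem.Int.mod count 32 ≠ 0 then pieces ++ [", "]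
            else if count = 0 then pieces ++ ["\n\t\t"]
            else pieces ++ [",\n\t\t"]
          (pieces ++ [value], count + 1)) st row)
      = (fun (st : List String × Int) row => row.foldl pvStep st) from rfl]
  rw [pvFoldl_rows]
  set flat := m.flatMap (fun row => row) with hflat
  set n := PySem.List.len flat with hn
  have hlenf : (flat.length : Int) = n := by simp [hn, PySem.List.len]
  have hn0 : 0 ≤ n := by omega
  set lineB : Int → String :=
    (fun i => "\t\t" ++ PySem.Str.join ", " (PySem.List.slice flat (some i) (some (i + 32))))
    with hlineB
  have hfold : (PySem.List.pyRange 0 n 32).foldl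
      (fun acc i =>
        acc ++ [if i + 32 < n then lineB i ++ "," else lineB i]) vhdlHeader
      = vhdlHeader ++ (PySem.List.pyRange 0 n 32).map
        (fun i => if i + 32 < n then lineB i ++ "," else lineB i) :=
    PySem.List.foldl_append_singleton_eq_map _ _ _
  rw [hfold]
  -- B side: single cons/append normal form
  rw [show ([pvHeaderStr] ++ pvEmit 0 flat ++ ["\n"] ++ [pvFooterStr])
      = [pvHeaderStr] ++ (pvEmit 0 flat ++ (["\n"] ++ [pvFooterStr])) by simp]
  rw [pvJoin0_append, pvJoin0_append, pvJoin0_append, pvJoin0_cons, pvJoin0_nil, pvJoin0_cons,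
    pvJoin0_nil, pvJoin0_cons, pvJoin0_nil]
  rw [pvEmitAll flat.length flat 0 (by omega) (by omega) (by omega)]
  by_cases hfe : flat = []
  · -- no memory contents: A joins header ++ footer directly
    have hzero : n = 0 := by rw [hn, hfe]; simp [PySem.List.len]
    rw [if_pos hfe, pvRange_nil 0 n 32 (by omega) (by omega)]
    simp only [List.map_nil, List.append_nil]
    rw [pvJoin_append "\n" vhdlHeader vhdlFooter (by simp [vhdlHeader]) (by simp [vhdlFooter]),
      pvHeaderStr_eq, pvFooterStr_eq]
    simp [String.append_assoc, String.append_empty, String.empty_append]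
  · have hnpos : 0 < n := by
      have : flat.length ≠ 0 := fun hc => hfe (List.eq_nil_of_length_eq_zero hc)
      omega
    have hrne : PySem.List.pyRange 0 n 32 ≠ [] := by
      rw [pvRange_cons 0 n 32 (by omega) (by omega)]; simp
    have hmidA : (PySem.List.pyRange 0 n 32).map
        (fun i => if i + 32 < n then lineB i ++ "," else lineB i) ≠ [] := by
      simpa using hrne
    rw [List.append_assoc,
      pvJoin_append "\n" vhdlHeader _ (by simp [vhdlHeader]) (by simp [vhdlFooter]),
      pvJoin_append "\n" _ vhdlFooter hmidA (by simp [vhdlFooter]),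
      pvCommafy n lineB n.toNat 0 (by omega)]
    have hmap : (PySem.List.pyRange 0 n 32).map lineB
        = (pvChunks flat).map pvLine := by
      have h0 := pvChunk_slices flat.length 0 flat (by omega) (by omega)
      rw [hn]
      rw [show (PySem.List.pyRange 0 (PySem.List.len flat) 32).map lineB
          = ((PySem.List.pyRange 0 (PySem.List.len flat) 32).map
              (fun i => PySem.List.slice flat (some i) (some (i + 32)))).map pvLine by
        rw [List.map_map]; rfl]
      rw [h0]
      simp
    rw [hmap, if_neg hfe, if_pos rfl, pvHeaderStr_eq, pvFooterStr_eq]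
    simp [String.append_assoc]
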